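-- pv_equiv track=rewrite | github.com/lif323/NBTNGMA4ED | data_processor.py | get_seg_features
-- ===== SOURCE A (Python) =====
-- def get_seg_features(tags):
--     tags_dict = {'O': 0, '1_PER': 1, '1_Time': 2, '1_GPE': 3, '1_ORG': 4, '1_FAC': 5, '1_LOC': 6, '1_VEH': 7, '1_Numeric': 8, '1_WEA': 9, '1_Crime': 10, '1_Sentence': 11, '1_Job_Title': 12, '1_Contact_Info': 13}
--     seg_feature = []
--     for tag in tags:
--         if "1_PER" in tag:
--             entity_tag = 1
--         elif "1_GPE" in tag:
--             entity_tag = 2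
--         elif "1_Time" in tag:
--             entity_tag = 3
--         elif "1_ORG" in tag:
--             entity_tag = 4
--         elif "1_FAC" in tag:
--             entity_tag = 5
--         elif "1_VEH" in tag:
--             entity_tag = 6
--         elif "1_GPE" in tag:
--             entity_tag = 7
--         elif "1_Numeric" in tag:
--             entity_tag = 8
--         elif "1_Crime" in tag:
--             entity_tag = 9
--         elif "1_Sentence" in tag:
--             entity_tag = 10
--         elif "1_Contact_Info" in tag:
--             entity_tag = 11
--         elif "1_Job_Title" in tag:
--             entity_tag = 12
--         elif "1_WEA" in tag:
--             entity_tag = 13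
--         else:
--             entity_tag = 0
--         seg_feature.append(entity_tag)
--     return seg_feature
-- ===== SOURCE B (Python) =====
-- PATTERNS = [
--     ("1_PER", 1), ("1_GPE", 2), ("1_Time", 3), ("1_ORG", 4),
--     ("1_FAC", 5), ("1_VEH", 6), ("1_Numeric", 8), ("1_Crime", 9),
--     ("1_Sentence", 10), ("1_Contact_Info", 11), ("1_Job_Title", 12),
--     ("1_WEA", 13),
-- ]
--
-- def get_seg_features(tags):
--     # staged passes: apply patterns lowest priority first, overwriting with
--     # higher-priority codes; the final overwrite wins, so each slot ends at
--     # the highest-priority pattern contained in its tag (0 if none).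
--     res = [0] * len(tags)
--     for pat, code in reversed(PATTERNS):
--         for i, tag in enumerate(tags):
--             if pat in tag:
--                 res[i] = code
--     return res
-- ===== Notes on version B (the rewrite author's own statement) =====
-- stated objective: alternative
-- what changed: Replaces A's per-tag first-match if/elif ladder with staged passes: an outer loop over the 12 patterns in reverse priority order, each making a full pass over the tags and overwriting a preallocated result array, so the last (highest-priority) matching pattern wins; the unreachable duplicate 1_GPE branch disappears.
import Mathlib
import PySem

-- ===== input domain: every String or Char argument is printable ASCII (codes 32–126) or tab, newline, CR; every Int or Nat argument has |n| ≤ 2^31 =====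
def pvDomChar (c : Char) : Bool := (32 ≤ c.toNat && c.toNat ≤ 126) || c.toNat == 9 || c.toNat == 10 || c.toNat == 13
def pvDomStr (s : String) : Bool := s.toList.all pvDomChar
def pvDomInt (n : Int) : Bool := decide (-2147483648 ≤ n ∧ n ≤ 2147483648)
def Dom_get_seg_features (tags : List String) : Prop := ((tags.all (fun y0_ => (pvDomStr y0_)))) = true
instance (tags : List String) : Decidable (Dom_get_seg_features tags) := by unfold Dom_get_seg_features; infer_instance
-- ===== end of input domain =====

-- B replaces A's per-tag first-match if/elif ladder with staged passes: patterns are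
-- applied lowest priority first, each pass overwriting a preallocated result array,
-- so the highest-priority matching pattern wins (objective: alternative).

-- ===== PORT A =====
-- the if/elif ladder of A, per tag (tags_dict in A is dead code and does not affect the result)
def pvEntityTag (tag : String) : Int :=
  if PySem.Str.isIn "1_PER" tag then 1
  else if PySem.Str.isIn "1_GPE" tag then 2
  else if PySem.Str.isIn "1_Time" tag then 3
  else if PySem.Str.isIn "1_ORG" tag then 4
  else if PySem.Str.isIn "1_FAC" tag then 5
  else if PySem.Str.isIn "1_VEH" tag then 6
  else if PySem.Str.isIn "1_GPE" tag then 7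
  else if PySem.Str.isIn "1_Numeric" tag then 8
  else if PySem.Str.isIn "1_Crime" tag then 9
  else if PySem.Str.isIn "1_Sentence" tag then 10
  else if PySem.Str.isIn "1_Contact_Info" tag then 11
  else if PySem.Str.isIn "1_Job_Title" tag then 12
  else if PySem.Str.isIn "1_WEA" tag then 13
  else 0

def get_seg_features (tags : List String) : List Int :=
  tags.foldl (fun seg_feature tag => seg_feature ++ [pvEntityTag tag]) []

-- ===== PORT B =====
def pvPatterns : List (String × Int) :=
  [("1_PER", 1), ("1_GPE", 2), ("1_Time", 3), ("1_ORG", 4),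
   ("1_FAC", 5), ("1_VEH", 6), ("1_Numeric", 8), ("1_Crime", 9),
   ("1_Sentence", 10), ("1_Contact_Info", 11), ("1_Job_Title", 12),
   ("1_WEA", 13)]

-- one inner pass: 'for i, tag in enumerate(tags): if pat in tag: res[i] = code'
def pvPass (pat : String) (code : Int) (tags : List String) (res : List Int) : List Int :=
  List.zipWith (fun tag r => if PySem.Str.isIn pat tag then code else r) tags res

def get_seg_features_alt (tags : List String) : List Int :=
  pvPatterns.reverse.foldl (fun res pc => pvPass pc.1 pc.2 tags res)
    (List.replicate tags.length 0)

-- ===== PRECONDITION & SPEC =====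
def Spec_get_seg_features (tags : List String) (out : List Int) : Prop := out = get_seg_features_alt tags
instance (tags : List String) (out : List Int) : Decidable (Spec_get_seg_features tags out) := by unfold Spec_get_seg_features; infer_instance

-- ===== CLAIM (what is proved, stated in full; the proofs are below) =====
def Claim_equal_get_seg_features : Prop := ∀ (tags : List String), Dom_get_seg_features tags → Spec_get_seg_features tags (get_seg_features tags)

-- ===== LEMMAS AND PROOFS =====
theorem zipWith_self_map {α β γ : Type} (g : α → β → γ) (f : α → β) (l : List α) :
    List.zipWith g l (l.map f) = l.map (fun x => g x (f x)) := by
  induction l with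
  | nil => rfl
  | cons x xs ih => simp [ih]

-- the staged passes act pointwise: folding passes over tags.map f folds the scalar update per tag
theorem foldl_pass_map (ps : List (String × Int)) (tags : List String) (f : String → Int) :
    ps.foldl (fun res pc => pvPass pc.1 pc.2 tags res) (tags.map f)
      = tags.map (fun t => ps.foldl (fun v pc => if PySem.Str.isIn pc.1 t then pc.2 else v) (f t)) := by
  induction ps generalizing f with
  | nil => rfl
  | cons pc rest ih =>
      simp only [List.foldl_cons, pvPass, zipWith_self_map]
      exact ih _

-- per-tag: the scalar reverse-order overwrite fold equals A's ladder (its duplicate "1_GPE"→7 branch is dead)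
set_option maxHeartbeats 1000000 in
theorem scalar_eq_entityTag (t : String) :
    pvPatterns.reverse.foldl (fun v pc => if PySem.Str.isIn pc.1 t then pc.2 else v) 0
      = pvEntityTag t := by
  show (if PySem.Str.isIn "1_PER" t then (1:Int) else if PySem.Str.isIn "1_GPE" t then 2
    else if PySem.Str.isIn "1_Time" t then 3 else if PySem.Str.isIn "1_ORG" t then 4
    else if PySem.Str.isIn "1_FAC" t then 5 else if PySem.Str.isIn "1_VEH" t then 6
    else if PySem.Str.isIn "1_Numeric" t then 8 else if PySem.Str.isIn "1_Crime" t then 9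
    else if PySem.Str.isIn "1_Sentence" t then 10 else if PySem.Str.isIn "1_Contact_Info" t then 11
    else if PySem.Str.isIn "1_Job_Title" t then 12 else if PySem.Str.isIn "1_WEA" t then 13
    else 0) = pvEntityTag t
  unfold pvEntityTag
  by_cases h0 : PySem.Str.isIn "1_PER" t = true
  · simp only [if_pos h0]
  simp only [if_neg h0]
  by_cases h1 : PySem.Str.isIn "1_GPE" t = true
  · simp only [if_pos h1]
  simp only [if_neg h1]

theorem foldl_append_map (tags : List String) (acc : List Int) :
    tags.foldl (fun seg_feature tag => seg_feature ++ [pvEntityTag tag]) acc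
      = acc ++ tags.map pvEntityTag := by
  induction tags generalizing acc with
  | nil => simp
  | cons t ts ih => simp [List.foldl_cons, ih]

-- ===== VERDICT (by name: the statement is the Claim_ definition above) =====
theorem get_seg_features_spec : Claim_equal_get_seg_features := by
  intro tags _
  unfold Spec_get_seg_features get_seg_features get_seg_features_alt
  have hrep : List.replicate tags.length (0:Int) = tags.map (fun _ => 0) := by
    simp [List.map_const']
  rw [foldl_append_map, hrep, foldl_pass_map, List.nil_append]
  exact List.map_congr_left fun t _ => (scalar_eq_entityTag t).symm
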